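-- pv_equiv track=rewrite | github.com/parkerburchett/Numerai | CleanAndParseNumerAILeaderBoard.py | group_users
-- ===== SOURCE A (Python) =====
-- def group_users(lines):
--     """
--     note this excludes the last user in the list. here it excludes
--
--     4861
--     NEKOG_COMP
--     -0.0998	-0.0998	-0.0997
--
--     You might want to add this manually later
--
--     lines in all the lines in cleaned_scores.txt
--     you take this and return a list of tuples where each tuple is a unique user.
--     """
--
--     counter =0
--     lines_with_rank =[0]
--     user_tupules =[]
--     start_index =0
--     for line in lines[1:]:
--         try:
--             rank = int(line) # you are gettign groups by the rank as a single line
--             if rank == 10001110101: # you are just excluding the only user with a weird name. make a joke about this in teh tableau of this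
--                 raise Exception
--             counter+=1
--             lines_with_rank.append(counter)
--         except:
--             counter+=1
--
--     for i in range(len(lines_with_rank)-1):
--         tup = (lines_with_rank[i], lines_with_rank[i+1])
--         user = lines[tup[0]:tup[1]]
--         user = [l.strip() for l in user]
--         a = [s.split('\t') for s in user]
--         user_tupules.append(a)
--
--
--     # at this point you need to work backwards and get the last element.
--     tup = (lines_with_rank[-1], 0) # might be len lines -1
--     user = lines[tup[0]:]
--     user = [l.strip() for l in user]
--     a = [s.split('\t') for s in user]
--     user_tupules.append(a)
--
--     lengths = [len(a) for a in user_tupules]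
--     len_2_users = [l for l in user_tupules if len(l) ==2]
--
--     # the only element in len_2 users is '10001110101'
--     # [[['10001110101'], ['-0.096', '-0.0961', '-0.0962']]]
--     len_3_users = [l for l in user_tupules if len(l) ==3]
--     len_4_users = [l for l in user_tupules if len(l) ==4]
--     len_5_users = [l for l in user_tupules if len(l) ==5]
--     len_6_users = [l for l in user_tupules if len(l) ==6]
--
--     user_groups = [len_2_users, len_3_users ,len_4_users ,len_5_users ,len_6_users]
--     return user_groups
-- ===== SOURCE B (Python) =====
-- def group_users(lines):
--     """Single reverse pass: walk the lines back-to-front, shaping each line as it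
--     is consumed (current group kept back-to-front), closing a group whenever its
--     first line (a rank line other than the excluded id) is reached; each closed
--     group goes straight into a fixed length-indexed bucket, and the buckets are
--     un-reversed once at the end so original order is preserved."""
--     buckets = [[], [], [], [], []]
--     group = []  # current group, back-to-front
--     for line in reversed(lines[1:]):
--         group.append(line.strip().split('\t'))
--         if _starts_group(line):
--             _emit(buckets, group)
--             group = []
--     if lines:
--         group.append(lines[0].strip().split('\t'))
--     _emit(buckets, group)
--     return [b[::-1] for b in buckets]
--
--
-- def _emit(buckets, group):
--     n = len(group)
--     if 2 <= n <= 6: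
--         buckets[n - 2].append(group[::-1])
--
--
-- def _starts_group(line):
--     try:
--         rank = int(line)
--     except ValueError:
--         return False
--     return rank != 10001110101
-- ===== Notes on version B (the rewrite author's own statement) =====
-- stated objective: alternative
-- what changed: Replaces A's boundary-index collection plus slicing plus five filter passes with a single reverse traversal that shapes each line as it is consumed, closes a group when its leading rank line is reached, and appends each group directly into fixed length-indexed buckets that are un-reversed once at the end, so no index list, no slices and no filter passes exist.
import Mathlib
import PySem

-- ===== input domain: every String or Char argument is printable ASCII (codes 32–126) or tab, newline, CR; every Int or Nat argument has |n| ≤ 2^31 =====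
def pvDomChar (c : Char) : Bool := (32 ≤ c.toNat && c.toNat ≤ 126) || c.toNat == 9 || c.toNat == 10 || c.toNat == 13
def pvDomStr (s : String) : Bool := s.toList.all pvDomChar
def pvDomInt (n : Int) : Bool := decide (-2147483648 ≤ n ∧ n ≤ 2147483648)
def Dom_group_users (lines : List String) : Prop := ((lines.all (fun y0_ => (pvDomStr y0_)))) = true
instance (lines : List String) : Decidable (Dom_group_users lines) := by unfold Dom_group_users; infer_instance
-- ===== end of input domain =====

-- B replaces A's boundary-index collection + slicing + five filter passes by one reverse
-- traversal that shapes lines as consumed, closes a group at each leading rank line and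
-- drops it straight into length-indexed buckets (objective: alternative; same asymptotic cost).

-- ===== PORT A =====
def group_users (lines : List String) : List (List (List (List String))) :=
  let st := (PySem.List.slice lines (some 1) none).foldl
      (fun (st : Int × List Int) line =>
        let counter := st.1 + 1
        match PySem.Int.ofStr? line with
        | some rank =>
            if rank = 10001110101 then (counter, st.2)  -- raise Exception, caught: counter += 1 only
            else (counter, st.2 ++ [counter])
        | none => (counter, st.2))                      -- ValueError, caught: counter += 1 only
      (0, [0])
  let lines_with_rank := st.2
  let user_tupules := (PySem.List.pyRange 0 ((lines_with_rank.length : Int) - 1) 1).foldl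
      (fun acc i =>
        let user := PySem.List.slice lines (some (PySem.List.pyGetD lines_with_rank i 0))
                                           (some (PySem.List.pyGetD lines_with_rank (i + 1) 0))
        let user := user.map (fun l => PySem.Str.strip l)
        let a := user.map (fun s => (PySem.Str.split? s "\t").getD [])
        acc ++ [a]) []
  let user := PySem.List.slice lines (some (PySem.List.pyGetD lines_with_rank (-1) 0)) none
  let user := user.map (fun l => PySem.Str.strip l)
  let a := user.map (fun s => (PySem.Str.split? s "\t").getD [])
  let user_tupules := user_tupules ++ [a]
  let len_2_users := user_tupules.filter (fun l => ((l.length : Int) == 2))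
  let len_3_users := user_tupules.filter (fun l => ((l.length : Int) == 3))
  let len_4_users := user_tupules.filter (fun l => ((l.length : Int) == 4))
  let len_5_users := user_tupules.filter (fun l => ((l.length : Int) == 5))
  let len_6_users := user_tupules.filter (fun l => ((l.length : Int) == 6))
  [len_2_users, len_3_users, len_4_users, len_5_users, len_6_users]

-- ===== PORT B =====
-- line.strip().split('\t')
def pvShape (l : String) : List String := (PySem.Str.split? (PySem.Str.strip l) "\t").getD []

-- _starts_group: int(line) parses and is not the excluded id
def pvStarts (line : String) : Bool :=
  match PySem.Int.ofStr? line with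
  | none => false
  | some r => r != 10001110101

-- _emit: append the un-reversed group (group[::-1]) to its length bucket
def pvEmit (buckets : List (List (List (List String)))) (group : List (List String)) :
    List (List (List (List String))) :=
  let n := group.length
  if 2 ≤ n ∧ n ≤ 6 then buckets.modify (n - 2) (fun b => b ++ [group.reverse]) else buckets

-- the reverse loop of Source B over reversed(lines[1:]): state = (buckets, current group back-to-front)
def pvLoopB : List String → List (List (List (List String))) → List (List String) →
    List (List (List (List String))) × List (List String)
  | [], buckets, group => (buckets, group)
  | line :: rest, buckets, group =>
      let group' := group ++ [pvShape line]
      if pvStarts line then pvLoopB rest (pvEmit buckets group') []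
      else pvLoopB rest buckets group'

def group_users_alt (lines : List String) : List (List (List (List String))) :=
  let s := pvLoopB ((PySem.List.slice lines (some 1) none).reverse) [[], [], [], [], []] []
  let group := match lines with            -- if lines: group.append(lines[0].strip().split('\t'))
    | [] => s.2
    | l0 :: _ => s.2 ++ [pvShape l0]
  (pvEmit s.1 group).map (fun b => b.reverse)   -- [b[::-1] for b in buckets]

-- ===== PRECONDITION & SPEC =====
def Spec_group_users (lines : List String) (out : List (List (List (List String)))) : Prop := out = group_users_alt lines
instance (lines : List String) (out : List (List (List (List String)))) : Decidable (Spec_group_users lines out) := by unfold Spec_group_users; infer_instance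

-- ===== CLAIM (what is proved, stated in full; the proofs are below) =====
def Claim_equal_group_users : Prop := ∀ (lines : List String), Dom_group_users lines → Spec_group_users lines (group_users lines)

-- ===== LEMMAS AND PROOFS =====

-- boundary positions (1-based within lines) at which a group closes
def pvBnds : List String → Int → List Int
  | [], _ => []
  | line :: rest, pos =>
    match PySem.Int.ofStr? line with
    | none => pvBnds rest (pos + 1)
    | some r => if r = 10001110101 then pvBnds rest (pos + 1)
                else (pos + 1) :: pvBnds rest (pos + 1)

-- generic consecutive-pair chunks of a boundary list
def pvChunksG {α : Type} (g : Int → Int → α) (h : Int → α) : Int → List Int → List α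
  | start, [] => [h start]
  | start, b :: bs => g start b :: pvChunksG g h b bs

lemma pvFoldA (L : List String) : ∀ (c : Int) (acc : List Int),
    L.foldl (fun (st : Int × List Int) line =>
        let counter := st.1 + 1
        match PySem.Int.ofStr? line with
        | some rank => if rank = 10001110101 then (counter, st.2) else (counter, st.2 ++ [counter])
        | none => (counter, st.2)) (c, acc)
      = (c + L.length, acc ++ pvBnds L c) := by
  induction L with
  | nil => intro c acc; simp [pvBnds]
  | cons line rest ih =>
      intro c acc
      simp only [List.foldl_cons, pvBnds]
      cases hp : PySem.Int.ofStr? line with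
      | none => simp [ih]; omega
      | some r =>
          by_cases hr : r = 10001110101 <;> simp [hr, ih] <;> omega

lemma pvPairs {α : Type} (g : Int → Int → α) (h : Int → α) : ∀ (bs : List Int) (start : Int),
    ((List.range bs.length).map
        (fun k => g ((start :: bs).getD k 0) ((start :: bs).getD (k + 1) 0)))
      ++ [h ((start :: bs).getLast (by simp))]
      = pvChunksG g h start bs := by
  intro bs
  induction bs with
  | nil => intro start; simp [pvChunksG]
  | cons b bs' ih =>
      intro start
      rw [List.length_cons, List.range_succ_eq_map]
      simp only [List.map_cons, List.map_map, Function.comp_def, List.getD_cons_succ,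
        List.getD_cons_zero, List.cons_append, pvChunksG]
      rw [List.getLast_cons (by simp)]
      congr 1
      simpa using ih b

-- the chunks both programs produce, shaped
def pvGroups (lines : List String) : List (List (List String)) :=
  pvChunksG (fun a b => (PySem.List.slice lines (some a) (some b)).map pvShape)
            (fun a => (PySem.List.slice lines (some a) none).map pvShape) 0
            (pvBnds lines.tail 0)

lemma pvAEq (lines : List String) :
    group_users lines
      = ([2, 3, 4, 5, 6] : List Int).map
          (fun n => (pvGroups lines).filter (fun g => ((g.length : Int) == n))) := by
  unfold group_users
  rw [pvFoldA]
  simp only [List.nil_append, PySem.List.foldl_append_singleton_eq_map, List.singleton_append,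
    PySem.List.slice_from_one]
  have key :
      (PySem.List.pyRange 0 (((0 :: pvBnds lines.tail 0).length : Int) - 1)).map
          (fun x => List.map (fun s => (PySem.Str.split? s "\t").getD [])
              (List.map (fun l => PySem.Str.strip l)
                (PySem.List.slice lines
                  (some (PySem.List.pyGetD (0 :: pvBnds lines.tail 0) x 0))
                  (some (PySem.List.pyGetD (0 :: pvBnds lines.tail 0) (x + 1) 0)))))
        ++ [List.map (fun s => (PySem.Str.split? s "\t").getD [])
              (List.map (fun l => PySem.Str.strip l)
                (PySem.List.slice lines
                  (some (PySem.List.pyGetD (0 :: pvBnds lines.tail 0) (-1) 0))))]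
        = pvGroups lines := by
    unfold pvGroups
    generalize pvBnds lines.tail 0 = bs
    rw [PySem.List.pyGetD_neg_one _ _ (by simp)]
    have hlen : (((0 :: bs : List Int).length : Int) - 1) = ((bs.length : Nat) : Int) := by
      simp
    rw [hlen, PySem.List.pyRange_one, Int.sub_zero, Int.toNat_natCast, List.map_map]
    refine Eq.trans ?_ (pvPairs
      (fun a b => (PySem.List.slice lines (some a) (some b)).map pvShape)
      (fun a => (PySem.List.slice lines (some a)).map pvShape) bs 0)
    refine congrArg₂ (· ++ ·) ?_ ?_
    · apply List.map_congr_left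
      intro k hk
      simp only [Function.comp_apply, zero_add, List.map_map, PySem.List.pyGetD_natCast]
      rw [show ((k : Int) + 1) = (((k + 1 : Nat)) : Int) by push_cast; ring,
        PySem.List.pyGetD_natCast]
      rfl
    · simp only [List.map_map]
      rfl
  rw [key]
  simp only [List.map_cons, List.map_nil]

-- B-side: collect the groups the reverse loop emits, in original order, with the leftover
def pvCollect : List String → List (List String) → List (List (List String)) × List (List String)
  | [], g => ([], g)
  | line :: rest, g =>
      let g' := pvShape line :: g
      if pvStarts line then
        let p := pvCollect rest []
        (p.1 ++ [g'], p.2)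
      else pvCollect rest g'

-- emit of a forward group (what _emit does after the group[::-1] un-reversal)
def pvEmitA (buckets : List (List (List (List String)))) (group : List (List String)) :
    List (List (List (List String))) :=
  let n := group.length
  if 2 ≤ n ∧ n ≤ 6 then buckets.modify (n - 2) (fun b => b ++ [group]) else buckets

lemma pvEmit_reverse (buckets : List (List (List (List String)))) (g : List (List String)) :
    pvEmit buckets g.reverse = pvEmitA buckets g := by
  simp [pvEmit, pvEmitA]

lemma pvLoopB_eq : ∀ (rev : List String) (buckets : List (List (List (List String))))
    (g : List (List String)),
    pvLoopB rev buckets g.reverse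
      = ((pvCollect rev g).1.foldr (fun grp b => pvEmitA b grp) buckets,
         (pvCollect rev g).2.reverse) := by
  intro rev
  induction rev with
  | nil => intro buckets g; rfl
  | cons line rest ih =>
      intro buckets g
      simp only [pvLoopB, pvCollect]
      rw [show g.reverse ++ [pvShape line] = (pvShape line :: g).reverse by simp]
      by_cases hs : pvStarts line
      · rw [if_pos hs, pvEmit_reverse,
          show ([] : List (List String)) = ([] : List (List String)).reverse from rfl, ih]
        simp [hs, List.foldr_append]
      · rw [if_neg hs, ih]
        simp [hs]

lemma pvCollect_append : ∀ (xs ys : List String) (g : List (List String)),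
    pvCollect (xs ++ ys) g
      = ((pvCollect ys (pvCollect xs g).2).1 ++ (pvCollect xs g).1,
         (pvCollect ys (pvCollect xs g).2).2) := by
  intro xs
  induction xs with
  | nil => intro ys g; simp [pvCollect]
  | cons line rest ih =>
      intro ys g
      simp only [List.cons_append, pvCollect]
      by_cases hs : pvStarts line
      · simp [hs, ih]
      · simp [hs, ih]

-- forward splitter: groups of a suffix in original order (head = leading partial group)
def pvConsHead (x : List String) : List (List (List String)) → List (List (List String))
  | [] => [[x]]
  | g :: gs => (x :: g) :: gs

def pvFS : List String → List (List (List String))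
  | [] => [[]]
  | line :: rest =>
      let gs := pvConsHead (pvShape line) (pvFS rest)
      if pvStarts line then [] :: gs else gs

lemma pvCollect_reverse : ∀ (t : List String),
    (pvCollect t.reverse []).2 :: (pvCollect t.reverse []).1 = pvFS t := by
  intro t
  induction t with
  | nil => rfl
  | cons line rest ih =>
      rw [List.reverse_cons, pvCollect_append]
      simp only [pvFS, ← ih]
      by_cases hs : pvStarts line
      · simp [pvCollect, hs, pvConsHead]
      · simp [pvCollect, hs, pvConsHead]

-- bucketing a group list back-to-front with pvEmitA builds the five length filters, reversed
lemma pvFoldrEmit (gs : List (List (List String))) :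
    gs.foldr (fun grp b => pvEmitA b grp) [[], [], [], [], []]
      = [(gs.filter (fun g => ((g.length : Int) == 2))).reverse,
         (gs.filter (fun g => ((g.length : Int) == 3))).reverse,
         (gs.filter (fun g => ((g.length : Int) == 4))).reverse,
         (gs.filter (fun g => ((g.length : Int) == 5))).reverse,
         (gs.filter (fun g => ((g.length : Int) == 6))).reverse] := by
  induction gs with
  | nil => rfl
  | cons g gs ih =>
      simp only [List.foldr_cons, ih, List.filter_cons]
      by_cases h : 2 ≤ g.length ∧ g.length ≤ 6
      · obtain ⟨h1, h6⟩ := h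
        interval_cases hg : g.length <;>
          simp [pvEmitA, hg, List.modify, List.modifyTailIdx, List.modifyTailIdx.go, List.modifyHead]
      · have e2 : ((g.length : Int) == 2) = false := by simp; omega
        have e3 : ((g.length : Int) == 3) = false := by simp; omega
        have e4 : ((g.length : Int) == 4) = false := by simp; omega
        have e5 : ((g.length : Int) == 5) = false := by simp; omega
        have e6 : ((g.length : Int) == 6) = false := by simp; omega
        simp [pvEmitA, h, e2, e3, e4, e5, e6]

-- the full group list B produces, in original order
def pvFull : List String → List (List (List String))
  | [] => pvFS []
  | l0 :: t => pvConsHead (pvShape l0) (pvFS t)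

lemma pvBEq (lines : List String) :
    group_users_alt lines
      = ([2, 3, 4, 5, 6] : List Int).map
          (fun n => (pvFull lines).filter (fun g => ((g.length : Int) == n))) := by
  unfold group_users_alt
  rw [PySem.List.slice_from_one]
  have hl := pvLoopB_eq lines.tail.reverse [[], [], [], [], []] []
  simp only [List.reverse_nil] at hl
  rw [hl]
  have hrev := pvCollect_reverse lines.tail
  cases lines with
  | nil => rfl
  | cons l0 t =>
      simp only [List.tail_cons] at hrev ⊢
      rw [show (pvCollect t.reverse []).2.reverse ++ [pvShape l0]
          = (pvShape l0 :: (pvCollect t.reverse []).2).reverse by simp]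
      rw [pvEmit_reverse,
        show pvEmitA ((pvCollect t.reverse []).1.foldr (fun grp b => pvEmitA b grp) [[], [], [], [], []])
            (pvShape l0 :: (pvCollect t.reverse []).2)
          = ((pvShape l0 :: (pvCollect t.reverse []).2) :: (pvCollect t.reverse []).1).foldr
              (fun grp b => pvEmitA b grp) [[], [], [], [], []] from rfl]
      have : (pvShape l0 :: (pvCollect t.reverse []).2) :: (pvCollect t.reverse []).1
          = pvConsHead (pvShape l0) ((pvCollect t.reverse []).2 :: (pvCollect t.reverse []).1) := rfl
      rw [this, hrev, pvFoldrEmit]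
      simp [pvFull]

-- prefix a partial group onto the head group
def pvConsMany (p : List (List String)) : List (List (List String)) → List (List (List String))
  | [] => [p]
  | g :: gs => (p ++ g) :: gs

lemma pvConsMany_singleton (x : List String) (gs : List (List (List String))) :
    pvConsMany [x] gs = pvConsHead x gs := by
  cases gs <;> simp [pvConsMany, pvConsHead]

lemma pvConsMany_consHead (p : List (List String)) (x : List String)
    (gs : List (List (List String))) :
    pvConsMany p (pvConsHead x gs) = pvConsMany (p ++ [x]) gs := by
  cases gs <;> simp [pvConsMany, pvConsHead]

lemma pvChunks_eq (lines : List String) : ∀ (t : List String) (pos start : Nat),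
    start ≤ pos + 1 → lines.drop (pos + 1) = t →
    pvChunksG (fun a b => (PySem.List.slice lines (some a) (some b)).map pvShape)
              (fun a => (PySem.List.slice lines (some a) none).map pvShape)
              (start : Int) (pvBnds t (pos : Int))
      = pvConsMany (((lines.drop start).take (pos + 1 - start)).map pvShape) (pvFS t) := by
  intro t
  induction t with
  | nil =>
      intro pos start hle hdrop
      have hlen : lines.length ≤ pos + 1 := by
        by_contra h
        have := List.drop_eq_nil_iff.mp hdrop
        omega
      simp only [pvBnds, pvChunksG, pvFS, pvConsMany]
      rw [PySem.List.slice_from_natCast]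
      rw [List.take_of_length_le (by simp; omega)]
      simp
  | cons line rest ih =>
      intro pos start hle hdrop
      have hget : lines[pos + 1]? = some line := by
        have : (lines.drop (pos + 1))[0]? = some line := by rw [hdrop]; rfl
        rwa [List.getElem?_drop, Nat.add_zero] at this
      have hdrop' : lines.drop (pos + 2) = rest := by
        have : (lines.drop (pos + 1)).drop 1 = rest := by rw [hdrop]; rfl
        rwa [List.drop_drop] at this
      have hstep : ∀ s : Nat, s ≤ pos + 1 →
          (lines.drop s).take (pos + 2 - s) = (lines.drop s).take (pos + 1 - s) ++ [line] := by
        intro s hs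
        have h1 : pos + 2 - s = (pos + 1 - s) + 1 := by omega
        rw [h1, List.take_add_one, List.getElem?_drop]
        rw [show s + (pos + 1 - s) = pos + 1 by omega, hget]
        rfl
      have hbnds : pvBnds (line :: rest) (pos : Int)
          = match PySem.Int.ofStr? line with
            | none => pvBnds rest ((pos : Int) + 1)
            | some r => if r = 10001110101 then pvBnds rest ((pos : Int) + 1)
                        else ((pos : Int) + 1) :: pvBnds rest ((pos : Int) + 1) := rfl
      have hcast : ((pos : Int) + 1) = (((pos + 1 : Nat)) : Int) := by push_cast; ring
      by_cases hs : pvStarts line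
      · -- boundary: a rank line starts a new group here
        obtain ⟨r, hr, hne⟩ : ∃ r, PySem.Int.ofStr? line = some r ∧ r ≠ 10001110101 := by
          unfold pvStarts at hs
          cases h : PySem.Int.ofStr? line with
          | none => rw [h] at hs; exact absurd hs (by simp)
          | some r => rw [h] at hs; exact ⟨r, rfl, by simpa using hs⟩
        rw [hbnds]
        simp only [hr, if_neg hne]
        simp only [pvChunksG]
        rw [hcast, ih (pos + 1) (pos + 1) (by omega) (by simpa using hdrop')]
        have htake1 : (lines.drop (pos + 1)).take (pos + 2 - (pos + 1)) = [line] := by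
          rw [show pos + 2 - (pos + 1) = 1 by omega, hdrop]; rfl
        rw [htake1]
        rw [PySem.List.slice_natCast]
        simp only [List.map_cons, List.map_nil]
        rw [pvConsMany_singleton]
        simp [pvFS, hs, pvConsMany]
      · -- not a boundary: the line extends the current group
        have hb : pvBnds (line :: rest) (pos : Int) = pvBnds rest ((pos : Int) + 1) := by
          rw [hbnds]
          unfold pvStarts at hs
          cases h : PySem.Int.ofStr? line with
          | none => rfl
          | some r =>
              rw [h] at hs
              have : r = 10001110101 := by simpa using hs
              simp [this]
        rw [hb, hcast, ih (pos + 1) start (by omega) (by simpa using hdrop')]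
        have hfs : pvFS (line :: rest) = pvConsHead (pvShape line) (pvFS rest) := by
          simp [pvFS, hs]
        rw [hfs, pvConsMany_consHead,
          show [pvShape line] = List.map pvShape [line] from rfl,
          ← List.map_append, ← hstep start hle, show pos + 2 = pos + 1 + 1 from rfl]

lemma pvFull_eq (lines : List String) : pvFull lines = pvGroups lines := by
  unfold pvGroups
  have h := pvChunks_eq lines lines.tail 0 0 (by omega) (by rw [List.drop_one])
  rw [show ((0 : Nat) : Int) = (0 : Int) from rfl] at h
  rw [h]
  cases lines with
  | nil => rfl
  | cons l0 t =>
      simp only [List.tail_cons, List.drop_zero]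
      rw [show (l0 :: t).take (0 + 1 - 0) = [l0] from rfl]
      simp only [List.map_cons, List.map_nil]
      rw [pvConsMany_singleton]
      rfl

-- ===== VERDICT (by name: the statement is the Claim_ definition above) =====
theorem group_users_spec : Claim_equal_group_users := by
  intro lines _
  show group_users lines = group_users_alt lines
  rw [pvAEq, pvBEq, pvFull_eq]
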